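-- pv_equiv track=rewrite | github.com/CptCookie/AOC | Python/Year2024/Day5/solution.py | insert_at_correct_position
-- ===== SOURCE A (Python) =====
-- def in_correct_order(update: list[int], ordering_rules: dict[int, list[int]]):
--     for i, current in enumerate(update[:-1]):
--         if current not in ordering_rules:
--             return False
--         if not all(post in ordering_rules[current] for post in update[i + 1 :]):
--             return False
--     return True
--
-- def insert_at_correct_position(
--     sequence: list[int], new_item: int, ordering_rules: dict[int, list[int]]
-- ):
--     for new_idx in range(len(sequence)):
--         new_seq = sequence[:new_idx] + [new_item] + sequence[new_idx:]
--         if in_correct_order(new_seq, ordering_rules):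
--             return new_seq
--     return sequence + [new_item]
-- ===== SOURCE B (Python) =====
-- def insert_at_correct_position(sequence, new_item, ordering_rules):
--     def ok(a, b):
--         return a in ordering_rules and b in ordering_rules[a]
--     # the sequence itself must already satisfy every pairwise rule, else no insertion helps
--     base = all(ok(x, y) for i, x in enumerate(sequence) for y in sequence[i + 1:])
--     # p = first position whose element may not precede new_item (len(sequence) if none)
--     p = len(sequence)
--     for k, x in enumerate(sequence):
--         if not ok(x, new_item):
--             p = k
--             break
--     # suf = length of the longest suffix whose every element new_item may precede
--     suf = 0
--     for x in reversed(sequence):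
--         if not ok(new_item, x):
--             break
--         suf += 1
--     s = len(sequence) - suf  # smallest insertion index whose whole suffix is ok
--     if base and s <= p:
--         return sequence[:s] + [new_item] + sequence[s:]
--     return sequence + [new_item]
-- ===== Notes on version B (the rewrite author's own statement) =====
-- stated objective: faster
-- what changed: Instead of trying every insertion index and re-validating the whole candidate sequence each time, B checks the pairwise rules of the sequence once, then finds the first valid insertion index from a single forward scan (first prefix failure p, last suffix failure s) and slices once.
import Mathlib
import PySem

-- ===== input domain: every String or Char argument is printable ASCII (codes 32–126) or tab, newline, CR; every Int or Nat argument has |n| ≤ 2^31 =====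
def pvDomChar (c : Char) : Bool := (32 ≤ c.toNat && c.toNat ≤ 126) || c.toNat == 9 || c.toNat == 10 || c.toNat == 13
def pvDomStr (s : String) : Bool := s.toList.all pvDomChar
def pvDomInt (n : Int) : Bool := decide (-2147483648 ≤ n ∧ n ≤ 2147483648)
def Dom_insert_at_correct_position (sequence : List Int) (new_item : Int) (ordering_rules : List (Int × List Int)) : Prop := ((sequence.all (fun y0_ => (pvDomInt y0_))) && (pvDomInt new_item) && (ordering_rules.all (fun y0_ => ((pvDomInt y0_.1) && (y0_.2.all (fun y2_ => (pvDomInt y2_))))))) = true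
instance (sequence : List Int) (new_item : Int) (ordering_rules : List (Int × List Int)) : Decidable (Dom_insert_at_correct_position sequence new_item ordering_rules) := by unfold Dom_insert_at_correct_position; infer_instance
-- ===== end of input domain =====

-- B replaces A's try-every-index-and-revalidate search by one pairwise check of the
-- sequence plus a single scan computing the first valid insertion index (objective: faster).

-- ===== PORT A =====
-- in_correct_order's loop over enumerate(update[:-1]) with two early returns
def icoGo (update : List Int) (rules : PySem.Dict Int (List Int)) :
    List (Int × Int) → Bool
  | [] => true
  | (i, current) :: rest =>
    if !(rules.contains current) then false
    else if !((PySem.List.slice update (some (i + 1)) none).all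
        (fun post => (rules.getD current []).contains post)) then false
    else icoGo update rules rest

def in_correct_order (update : List Int) (rules : PySem.Dict Int (List Int)) : Bool :=
  icoGo update rules (PySem.List.enumerate (PySem.List.slice update none (some (-1))))

-- the 'for new_idx in range(len(sequence))' loop with its early return
def iacpGo (sequence : List Int) (new_item : Int) (rules : PySem.Dict Int (List Int)) :
    List Int → List Int
  | [] => sequence ++ [new_item]
  | new_idx :: rest =>
    let new_seq := PySem.List.slice sequence none (some new_idx) ++ [new_item] ++
      PySem.List.slice sequence (some new_idx) none
    if in_correct_order new_seq rules then new_seq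
    else iacpGo sequence new_item rules rest

def insert_at_correct_position (sequence : List Int) (new_item : Int)
    (ordering_rules : List (Int × List Int)) : List Int :=
  iacpGo sequence new_item (PySem.Dict.mk ordering_rules)
    (PySem.List.pyRange 0 sequence.length 1)

-- ===== PORT B =====
-- ok(a, b): a in ordering_rules and b in ordering_rules[a]
def okB (rules : PySem.Dict Int (List Int)) (a b : Int) : Bool :=
  rules.contains a && (rules.getD a []).contains b

-- base = all(ok(x, y) for i, x in enumerate(sequence) for y in sequence[i+1:])
def baseOkB (rules : PySem.Dict Int (List Int)) : List Int → Bool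
  | [] => true
  | x :: xs => xs.all (okB rules x) && baseOkB rules xs

-- the p-loop: index of the first x with not ok(x, new_item), length if none
def prefLenB (rules : PySem.Dict Int (List Int)) (new_item : Int) : List Int → Nat
  | [] => 0
  | x :: xs => if okB rules x new_item then prefLenB rules new_item xs + 1 else 0

-- the suf-loop: count of leading elements of the (already reversed) list with ok(new_item, x)
def sufLenB (rules : PySem.Dict Int (List Int)) (new_item : Int) : List Int → Nat
  | [] => 0
  | x :: xs => if okB rules new_item x then sufLenB rules new_item xs + 1 else 0

def insert_at_correct_position_alt (sequence : List Int) (new_item : Int)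
    (ordering_rules : List (Int × List Int)) : List Int :=
  let rules := PySem.Dict.mk ordering_rules
  let base := baseOkB rules sequence
  let p := prefLenB rules new_item sequence
  let s := sequence.length - sufLenB rules new_item sequence.reverse
  if base && decide (s ≤ p) then sequence.take s ++ [new_item] ++ sequence.drop s
  else sequence ++ [new_item]

-- ===== PRECONDITION & SPEC =====
def Spec_insert_at_correct_position (sequence : List Int) (new_item : Int) (ordering_rules : List (Int × List Int)) (out : List Int) : Prop := out = insert_at_correct_position_alt sequence new_item ordering_rules
instance (sequence : List Int) (new_item : Int) (ordering_rules : List (Int × List Int)) (out : List Int) : Decidable (Spec_insert_at_correct_position sequence new_item ordering_rules out) := by unfold Spec_insert_at_correct_position; infer_instance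

-- ===== CLAIM (what is proved, stated in full; the proofs are below) =====
def Claim_equal_insert_at_correct_position : Prop := ∀ (sequence : List Int) (new_item : Int) (ordering_rules : List (Int × List Int)), Dom_insert_at_correct_position sequence new_item ordering_rules → Spec_insert_at_correct_position sequence new_item ordering_rules (insert_at_correct_position sequence new_item ordering_rules)

-- ===== LEMMAS AND PROOFS =====

-- baseOkB is pairwise-ok
theorem baseOkB_eq_pairwise (d : PySem.Dict Int (List Int)) (u : List Int) :
    baseOkB d u = true ↔ u.Pairwise (fun a b => okB d a b = true) := by
  induction u with
  | nil => simp [baseOkB]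
  | cons x xs ih => simp [baseOkB, List.pairwise_cons, List.all_eq_true, ih, and_comm]

-- lists of length ≤ 1 are trivially pairwise-ok
theorem baseOkB_short (d : PySem.Dict Int (List Int)) (l : List Int) (h : l.length ≤ 1) :
    baseOkB d l = true := by
  match l with
  | [] => rfl
  | [x] => simp [baseOkB]
  | x :: y :: ys => simp at h

-- A's in_correct_order computes the pairwise check
theorem icoGo_spec (u : List Int) (d : PySem.Dict Int (List Int)) :
    ∀ j : Nat, icoGo u d (PySem.List.enumerate (u.dropLast.drop j) j) = baseOkB d (u.drop j) := by
  have key : ∀ (m j : Nat), u.dropLast.length - j ≤ m →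
      icoGo u d (PySem.List.enumerate (u.dropLast.drop j) j) = baseOkB d (u.drop j) := by
    intro m
    induction m with
    | zero =>
      intro j hj
      rw [List.drop_eq_nil_of_le (by omega)]
      rw [show PySem.List.enumerate ([] : List Int) j = [] from rfl]
      have hlen : (u.drop j).length ≤ 1 := by
        simp only [List.length_dropLast] at hj
        simp only [List.length_drop]
        omega
      rw [baseOkB_short d _ hlen]
      rfl
    | succ m ih =>
      intro j hj
      by_cases hlt : j < u.dropLast.length
      · have hju : j < u.length := by
          simp only [List.length_dropLast] at hlt; omega
        have hj1 : j + 1 < u.length := by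
          simp only [List.length_dropLast] at hlt; omega
        rw [List.drop_eq_getElem_cons hlt, PySem.List.enumerate_cons]
        have hx : u.dropLast[j] = u[j] := List.getElem_dropLast hlt
        rw [List.drop_eq_getElem_cons hju]
        simp only [icoGo, hx]
        have hcast : (j : Int) + 1 = ((j + 1 : Nat) : Int) := by push_cast; ring
        rw [hcast, PySem.List.slice_from_natCast]
        have htail := ih (j + 1) (by omega)
        rw [htail]
        have hne : u.drop (j + 1) ≠ [] := by
          apply List.ne_nil_of_length_pos
          simp only [List.length_drop]; omega
        by_cases hc : d.contains u[j] = true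
        · simp only [hc, Bool.not_true, Bool.false_eq_true, if_false]
          have hall : (u.drop (j+1)).all (okB d u[j]) =
              (u.drop (j+1)).all (fun post => (d.getD u[j] []).contains post) :=
            List.all_congr rfl (fun x => by simp [okB, hc])
          rw [show baseOkB d (u[j] :: u.drop (j+1)) =
              ((u.drop (j+1)).all (okB d u[j]) && baseOkB d (u.drop (j+1))) from rfl, hall]
          cases hPost : (u.drop (j+1)).all (fun post => (d.getD u[j] []).contains post) <;> simp
        · have hc' : d.contains u[j] = false := eq_false_of_ne_true hc
          simp only [hc', Bool.not_false, if_true]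
          obtain ⟨y, hy⟩ := List.exists_mem_of_ne_nil _ hne
          have : (u.drop (j+1)).all (okB d u[j]) = false := by
            rw [List.all_eq_false]
            exact ⟨y, hy, by simp [okB, hc']⟩
          rw [show baseOkB d (u[j] :: u.drop (j+1)) =
              ((u.drop (j+1)).all (okB d u[j]) && baseOkB d (u.drop (j+1))) from rfl, this]
          simp
      · have hnil : u.dropLast.drop j = [] := List.drop_eq_nil_of_le (by omega)
        rw [hnil, show PySem.List.enumerate ([] : List Int) j = [] from rfl]
        have hlen : (u.drop j).length ≤ 1 := by
          simp only [List.length_dropLast] at hlt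
          simp only [List.length_drop]
          omega
        rw [baseOkB_short d _ hlen]
        rfl
  exact fun j => key _ j le_rfl

theorem ico_eq_base (u : List Int) (d : PySem.Dict Int (List Int)) :
    in_correct_order u d = baseOkB d u := by
  have h := icoGo_spec u d 0
  simpa [in_correct_order, PySem.List.slice_to_neg_one] using h

-- validity of inserting at position k
theorem valid_iff (d : PySem.Dict Int (List Int)) (seq : List Int) (w : Int) (k : Nat) :
    in_correct_order (seq.take k ++ [w] ++ seq.drop k) d = true ↔
      (seq.Pairwise (fun a b => okB d a b = true) ∧
       (∀ x ∈ seq.take k, okB d x w = true) ∧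
       (∀ x ∈ seq.drop k, okB d w x = true)) := by
  rw [ico_eq_base, baseOkB_eq_pairwise, List.append_assoc, List.singleton_append,
    List.pairwise_append, List.pairwise_cons]
  constructor
  · rintro ⟨h1, ⟨h2a, h2b⟩, h3⟩
    refine ⟨?_, fun x hx => h3 x hx w List.mem_cons_self, h2a⟩
    have hcomb : List.Pairwise (fun a b => okB d a b = true) (seq.take k ++ seq.drop k) :=
      List.pairwise_append.mpr ⟨h1, h2b, fun a ha b hb => h3 a ha b (List.mem_cons_of_mem _ hb)⟩
    rwa [List.take_append_drop] at hcomb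
  · rintro ⟨hpw, hpre, hsuf⟩
    rw [← List.take_append_drop k seq, List.pairwise_append] at hpw
    refine ⟨hpw.1, ⟨hsuf, hpw.2.1⟩, ?_⟩
    intro a ha b hb
    rcases List.mem_cons.mp hb with rfl | hb'
    · exact hpre a ha
    · exact hpw.2.2 a ha b hb'

-- prefLenB facts
theorem prefLenB_take (d : PySem.Dict Int (List Int)) (w : Int) (l : List Int) :
    ∀ x ∈ l.take (prefLenB d w l), okB d x w = true := by
  induction l with
  | nil => simp
  | cons y ys ih =>
    simp only [prefLenB]
    split
    · next h =>
      intro x hx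
      rcases List.mem_cons.mp (by simpa using hx) with rfl | hx'
      · exact h
      · exact ih x hx'
    · simp

theorem prefLenB_fail (d : PySem.Dict Int (List Int)) (w : Int) (l : List Int)
    (h : prefLenB d w l < l.length) : okB d l[prefLenB d w l] w = false := by
  induction l with
  | nil => simp at h
  | cons y ys ih =>
    by_cases hy : okB d y w = true
    · simp only [prefLenB, hy, if_true, List.length_cons] at h ⊢
      rw [List.getElem_cons_succ]
      exact ih (by omega)
    · simp only [prefLenB, hy]
      exact eq_false_of_ne_true hy

-- sufLenB facts
theorem sufLenB_le (d : PySem.Dict Int (List Int)) (w : Int) (l : List Int) :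
    sufLenB d w l ≤ l.length := by
  induction l with
  | nil => simp [sufLenB]
  | cons x xs ih => simp only [sufLenB, List.length_cons]; split <;> omega

theorem sufLenB_take (d : PySem.Dict Int (List Int)) (w : Int) (l : List Int) :
    ∀ x ∈ l.take (sufLenB d w l), okB d w x = true := by
  induction l with
  | nil => simp
  | cons y ys ih =>
    simp only [sufLenB]
    split
    · next h =>
      intro x hx
      rcases List.mem_cons.mp (by simpa using hx) with rfl | hx'
      · exact h
      · exact ih x hx'
    · simp

theorem sufLenB_fail (d : PySem.Dict Int (List Int)) (w : Int) (l : List Int)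
    (h : sufLenB d w l < l.length) : okB d w l[sufLenB d w l] = false := by
  induction l with
  | nil => simp at h
  | cons y ys ih =>
    by_cases hy : okB d w y = true
    · simp only [sufLenB, hy, if_true, List.length_cons] at h ⊢
      rw [List.getElem_cons_succ]
      exact ih (by omega)
    · simp only [sufLenB, hy]
      exact eq_false_of_ne_true hy

-- the A-loop: all candidates invalid → fallback
theorem iacpGo_none (seq : List Int) (w : Int) (d : PySem.Dict Int (List Int))
    (l : List Int) (h0 : ∀ i ∈ l, 0 ≤ i)
    (hv : ∀ i ∈ l, 0 ≤ i → in_correct_order (seq.take i.toNat ++ [w] ++ seq.drop i.toNat) d = false) :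
    iacpGo seq w d l = seq ++ [w] := by
  induction l with
  | nil => rfl
  | cons i rest ih =>
    have hi : (0:Int) ≤ i := h0 i List.mem_cons_self
    simp only [iacpGo]
    rw [PySem.List.slice_to seq hi, PySem.List.slice_from seq hi,
      hv i List.mem_cons_self hi]
    simp only [Bool.false_eq_true, if_false]
    exact ih (fun j hj => h0 j (List.mem_cons_of_mem _ hj))
      (fun j hj hj0 => hv j (List.mem_cons_of_mem _ hj) hj0)

-- the A-loop: the first valid candidate is returned
theorem iacpGo_found (seq : List Int) (w : Int) (d : PySem.Dict Int (List Int))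
    (k : Nat) (l2 : List Int)
    (hk : in_correct_order (seq.take k ++ [w] ++ seq.drop k) d = true)
    (l1 : List Int) (h0 : ∀ i ∈ l1, 0 ≤ i)
    (hv : ∀ i ∈ l1, 0 ≤ i → in_correct_order (seq.take i.toNat ++ [w] ++ seq.drop i.toNat) d = false) :
    iacpGo seq w d (l1 ++ (k : Int) :: l2) = seq.take k ++ [w] ++ seq.drop k := by
  induction l1 with
  | nil =>
    simp only [List.nil_append, iacpGo]
    rw [PySem.List.slice_to seq (Int.natCast_nonneg k),
      PySem.List.slice_from seq (Int.natCast_nonneg k)]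
    simp only [Int.toNat_natCast]
    have hk' : in_correct_order (seq.take k ++ w :: seq.drop k) d = true := by
      simpa using hk
    simp [hk']
  | cons i rest ih =>
    have hi : (0:Int) ≤ i := h0 i List.mem_cons_self
    simp only [List.cons_append, iacpGo]
    rw [PySem.List.slice_to seq hi, PySem.List.slice_from seq hi,
      hv i List.mem_cons_self hi]
    simp only [Bool.false_eq_true, if_false]
    exact ih (fun j hj => h0 j (List.mem_cons_of_mem _ hj))
      (fun j hj hj0 => hv j (List.mem_cons_of_mem _ hj) hj0)

-- ===== VERDICT (by name: the statement is the Claim_ definition above) =====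
theorem insert_at_correct_position_spec : Claim_equal_insert_at_correct_position := by
  intro seq w rules _
  show insert_at_correct_position seq w rules = insert_at_correct_position_alt seq w rules
  unfold insert_at_correct_position insert_at_correct_position_alt
  set d := PySem.Dict.mk rules with hd
  set p := prefLenB d w seq with hpdef
  set t := sufLenB d w seq.reverse with htdef
  set n := seq.length with hn
  set s := n - t with hsdef
  have ht : t ≤ n := by
    have h := sufLenB_le d w seq.reverse
    rw [List.length_reverse] at h
    rw [htdef, hn]; exact h
  have hdrops : ∀ x ∈ seq.drop s, okB d w x = true := by
    intro x hx
    apply sufLenB_take d w seq.reverse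
    rw [List.take_reverse, List.mem_reverse]
    rw [← hn, ← hsdef]
    exact hx
  have hinv_lt : ∀ k : Nat, k < s →
      in_correct_order (seq.take k ++ [w] ++ seq.drop k) d = false := by
    intro k hk
    apply eq_false_of_ne_true
    intro hc
    rw [valid_iff] at hc
    have hs1 : s - 1 < n := by omega
    have hs1' : s - 1 < seq.length := by rw [← hn]; exact hs1
    have hlt : s - 1 - k < (seq.drop k).length := by
      rw [List.length_drop, ← hn]; omega
    have hmem0 := List.getElem_mem hlt
    rw [List.getElem_drop] at hmem0
    simp only [show k + (s - 1 - k) = s - 1 from by omega] at hmem0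
    have hbad := hc.2.2 _ hmem0
    have htn : t < seq.reverse.length := by rw [List.length_reverse, ← hn]; omega
    have hfail := sufLenB_fail d w seq.reverse htn
    rw [List.getElem_reverse] at hfail
    simp only [show seq.length - 1 - sufLenB d w seq.reverse = s - 1 from by
      rw [← hn, ← htdef]; omega] at hfail
    rw [hfail] at hbad
    exact Bool.false_ne_true hbad
  by_cases hbc : (baseOkB d seq && decide (s ≤ p)) = true
  · have hbase : baseOkB d seq = true := (Bool.and_eq_true _ _ |>.mp hbc).1
    have hsp : s ≤ p := of_decide_eq_true (Bool.and_eq_true _ _ |>.mp hbc).2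
    rw [if_pos hbc]
    by_cases hsn : s < n
    · have hvalid : in_correct_order (seq.take s ++ [w] ++ seq.drop s) d = true := by
        rw [valid_iff]
        refine ⟨(baseOkB_eq_pairwise d seq).mp hbase, ?_, hdrops⟩
        intro x hx
        apply prefLenB_take d w seq
        rw [← hpdef]
        have hsub : seq.take s ⊆ seq.take p := by
          intro y hy
          rw [show seq.take s = (seq.take p).take s from by
            rw [List.take_take, min_eq_left hsp]] at hy
          exact List.take_subset _ _ hy
        exact hsub hx
      have hsplit : PySem.List.pyRange 0 (n : Int) 1 =
          PySem.List.pyRange 0 (s : Int) 1 ++ (s : Int) :: PySem.List.pyRange ((s : Int) + 1) (n : Int) 1 := by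
        rw [PySem.List.pyRange_one_append 0 (s : Int) (n : Int) (Int.natCast_nonneg s)
          (by exact_mod_cast Nat.le_of_lt hsn)]
        rw [PySem.List.pyRange_one_cons (a := (s : Int)) (b := (n : Int)) (by exact_mod_cast hsn)]
      rw [hsplit]
      exact iacpGo_found seq w d s _ hvalid _
        (fun i hi => (PySem.List.mem_pyRange_one.mp hi).1)
        (fun i hi _ => by
          have h2 := (PySem.List.mem_pyRange_one.mp hi)
          exact hinv_lt i.toNat (by omega))
    · have hseq : s = n := by omega
      rw [iacpGo_none seq w d _ (fun i hi => (PySem.List.mem_pyRange_one.mp hi).1)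
        (fun i hi _ => by
          have h2 := (PySem.List.mem_pyRange_one.mp hi)
          exact hinv_lt i.toNat (by omega))]
      show seq ++ [w] = List.take s seq ++ [w] ++ List.drop s seq
      rw [hseq, hn]
      simp
  · rw [if_neg hbc]
    apply iacpGo_none seq w d _ (fun i hi => (PySem.List.mem_pyRange_one.mp hi).1)
    intro i hi _
    have h2 := (PySem.List.mem_pyRange_one.mp hi)
    have hkn : i.toNat < n := by omega
    rcases Bool.and_eq_false_iff.mp (eq_false_of_ne_true hbc) with hbase | hsp
    · apply eq_false_of_ne_true
      intro hcontra
      rw [valid_iff] at hcontra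
      have := (baseOkB_eq_pairwise d seq).mpr hcontra.1
      rw [hbase] at this
      exact Bool.false_ne_true this
    · have hps : p < s := by
        have := of_decide_eq_false hsp; omega
      by_cases hks : i.toNat < s
      · exact hinv_lt i.toNat hks
      · apply eq_false_of_ne_true
        intro hcontra
        rw [valid_iff] at hcontra
        have hpn : p < n := by omega
        have hplen : p < (seq.take i.toNat).length := by
          rw [List.length_take, ← hn]; omega
        have hmem := List.getElem_mem hplen
        rw [List.getElem_take] at hmem
        have hgood := hcontra.2.1 _ hmem
        have hfp := prefLenB_fail d w seq (by rw [← hpdef, ← hn]; omega)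
        exact Bool.false_ne_true (hfp.symm.trans hgood)
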